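-- pv_equiv track=rewrite | github.com/myrrkel/pyzik | src/globalConstants.py | keyToString
-- ===== SOURCE A (Python) =====
-- def keyToString(key):
--     skey = ""
--     for c in key:
--         if c.isdigit():
--             n = chr(97+int(c))
--             skey = skey+n.upper()
--         else:
--             skey = skey+c
--
--     return skey
-- ===== SOURCE B (Python) =====
-- _TABLE = str.maketrans("0123456789", "ABCDEFGHIJ")
--
--
-- def keyToString(key):
--     return key.translate(_TABLE)
-- ===== Notes on version B (the rewrite author's own statement) =====
-- stated objective: idiomatic
-- what changed: Replaces the per-character loop with if/else, chr/int arithmetic and repeated string concatenation by a precomputed str.maketrans digit-to-letter table applied with a single key.translate call.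
import Mathlib
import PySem

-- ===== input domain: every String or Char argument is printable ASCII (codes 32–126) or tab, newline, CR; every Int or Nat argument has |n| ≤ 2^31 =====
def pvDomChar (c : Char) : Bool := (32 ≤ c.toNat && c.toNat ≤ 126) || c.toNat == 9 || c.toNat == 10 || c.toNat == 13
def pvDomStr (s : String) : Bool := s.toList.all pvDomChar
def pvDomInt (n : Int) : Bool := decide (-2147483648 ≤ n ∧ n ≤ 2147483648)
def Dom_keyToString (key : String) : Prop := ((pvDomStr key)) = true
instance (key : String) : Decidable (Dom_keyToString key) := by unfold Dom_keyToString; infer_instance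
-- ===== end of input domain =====

-- B replaces A's per-character if/else accumulation loop by a precomputed digit→letter
-- translation table applied in one pass (idiomatic str.translate).

-- ===== PORT A =====
-- int(c) on a single digit char '0'..'9' is exactly c.toNat - 48 (exact on that domain, never raises there)
def keyToString (key : String) : String :=
  String.mk (key.toList.foldl (fun skey c =>
    if PySem.Chars.isdigit c then
      skey ++ [PySem.Chars.upperChar (Char.ofNat (97 + (c.toNat - 48)))]
    else
      skey ++ [c]) [])

-- ===== PORT B =====
-- the str.maketrans table of Source B, as an association list; translate = per-char lookup with identity default
def pvDigitTable : List (Char × Char) :=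
  [('0', 'A'), ('1', 'B'), ('2', 'C'), ('3', 'D'), ('4', 'E'),
   ('5', 'F'), ('6', 'G'), ('7', 'H'), ('8', 'I'), ('9', 'J')]

def keyToString_alt (key : String) : String :=
  String.mk (key.toList.map (fun c => (pvDigitTable.lookup c).getD c))

-- ===== PRECONDITION & SPEC =====
def Spec_keyToString (key : String) (out : String) : Prop := out = keyToString_alt key
instance (key : String) (out : String) : Decidable (Spec_keyToString key out) := by unfold Spec_keyToString; infer_instance

-- ===== CLAIM (what is proved, stated in full; the proofs are below) =====
def Claim_equal_keyToString : Prop := ∀ (key : String), Dom_keyToString key → Spec_keyToString key (keyToString key)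

-- ===== LEMMAS AND PROOFS =====

theorem pvChar_eq_of_toNat {c d : Char} (h : c.toNat = d.toNat) : c = d := by
  apply Char.ext
  exact UInt32.toNat_inj.mp h

-- the two per-character transformations agree on every char
theorem pvStep_eq (c : Char) :
    (if PySem.Chars.isdigit c then PySem.Chars.upperChar (Char.ofNat (97 + (c.toNat - 48))) else c)
      = (pvDigitTable.lookup c).getD c := by
  by_cases h : PySem.Chars.isdigit c = true
  · have h' := h
    simp only [PySem.Chars.isdigit, Bool.and_eq_true, decide_eq_true_eq, Char.le_def,
      UInt32.le_iff_toNat_le] at h'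
    have h48 : 48 ≤ c.toNat := h'.1
    have h57 : c.toNat ≤ 57 := h'.2
    interval_cases hn : c.toNat <;>
      · have hc : c = Char.ofNat c.toNat := pvChar_eq_of_toNat (by simp [hn, Char.toNat_ofNat])
        rw [hn] at hc
        subst hc
        decide
  · have hne : ∀ d : Char, PySem.Chars.isdigit d = true → (c == d) = false := by
      intro d hd
      apply beq_eq_false_iff_ne.mpr
      rintro rfl; exact h hd
    have hnone : pvDigitTable.lookup c = none := by
      simp [pvDigitTable, List.lookup,
        hne '0' (by decide), hne '1' (by decide), hne '2' (by decide), hne '3' (by decide),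
        hne '4' (by decide), hne '5' (by decide), hne '6' (by decide), hne '7' (by decide),
        hne '8' (by decide), hne '9' (by decide)]
    simp [h, hnone]

-- A's accumulation loop computes the map that B applies
theorem pvFoldl_eq_map (l : List Char) : ∀ acc : List Char,
    l.foldl (fun skey c =>
      if PySem.Chars.isdigit c then
        skey ++ [PySem.Chars.upperChar (Char.ofNat (97 + (c.toNat - 48)))]
      else
        skey ++ [c]) acc
      = acc ++ l.map (fun c => (pvDigitTable.lookup c).getD c) := by
  induction l with
  | nil => intro acc; simp
  | cons c rest ih =>
    intro acc
    simp only [List.foldl_cons, List.map_cons]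
    rw [ih]
    have hstep := pvStep_eq c
    by_cases h : PySem.Chars.isdigit c = true
    · simp only [h, if_true] at hstep ⊢
      rw [hstep]; simp
    · simp only [h, Bool.false_eq_true, if_false] at hstep ⊢
      rw [← hstep]; simp

-- ===== VERDICT (by name: the statement is the Claim_ definition above) =====
theorem keyToString_spec : Claim_equal_keyToString := by
  intro key _
  unfold Spec_keyToString keyToString keyToString_alt
  rw [pvFoldl_eq_map]
  simp
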